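-- pv_equiv track=rewrite | github.com/mArcinUci/Code_Wars_tryouts | cut_the_ropes.py | cut_the_ropes
-- ===== SOURCE A (Python) =====
-- def cut_the_ropes(arr):
--     answer = []
--     for _ in range(len(arr)):
--         if len(arr) > 0:
--             answer.append(len(arr))
--             min_arr = min(arr)
--             arr = [x-min_arr for x in arr if (x-min_arr>0)]
--     return answer
-- ===== SOURCE B (Python) =====
-- def cut_the_ropes(arr):
--     counts = {}
--     for x in arr:
--         counts[x] = counts.get(x, 0) + 1
--     answer = []
--     remaining = len(arr)
--     for v in sorted(counts):
--         answer.append(remaining)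
--         remaining -= counts[v]
--     return answer
-- ===== Notes on version B (the rewrite author's own statement) =====
-- stated objective: faster
-- what changed: replaces the repeated min-and-rebuild rounds (one pass over the surviving ropes per distinct length) with a single counting dict plus one sort of the distinct lengths, emitting the running remaining count per ascending distinct value
import Mathlib
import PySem

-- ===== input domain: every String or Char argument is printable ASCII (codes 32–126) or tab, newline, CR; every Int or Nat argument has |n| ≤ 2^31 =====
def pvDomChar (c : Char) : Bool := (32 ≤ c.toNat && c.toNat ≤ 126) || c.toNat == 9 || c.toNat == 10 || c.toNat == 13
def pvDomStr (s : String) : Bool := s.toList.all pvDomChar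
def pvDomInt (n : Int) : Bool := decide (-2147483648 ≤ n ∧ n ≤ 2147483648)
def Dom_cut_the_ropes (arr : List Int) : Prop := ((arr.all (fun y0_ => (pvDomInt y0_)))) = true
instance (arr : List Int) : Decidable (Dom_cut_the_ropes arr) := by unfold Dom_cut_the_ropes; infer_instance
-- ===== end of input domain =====

-- B replaces A's O(n·d) repeated min-and-rebuild rounds by one counting dict + one sort of the
-- distinct values (objective: faster, asymptotic).

-- ===== PORT A =====
-- one loop iteration body: if arr nonempty, append len(arr), then arr = [x-min for x in arr if x-min>0]
def cutA_step (st : List Int × List Int) : List Int × List Int :=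
  let answer := st.1
  let a := st.2
  if a.length > 0 then
    match PySem.List.min? a (fun x => x) with
    | some m => (answer ++ [(a.length : Int)],
                 a.filterMap (fun x => if x - m > 0 then some (x - m) else none))
    | none => (answer, a)
  else (answer, a)

-- 'for _ in range(len(arr))': repeat the body len(arr) times
def cutA_go : Nat → List Int × List Int → List Int × List Int
  | 0, st => st
  | Nat.succ k, st => cutA_go k (cutA_step st)

def cut_the_ropes (arr : List Int) : List Int :=
  (cutA_go arr.length ([], arr)).1

-- ===== PORT B =====
def cut_the_ropes_alt (arr : List Int) : List Int :=
  let counts : PySem.Dict Int Int :=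
    arr.foldl (fun d x => d.insert x (d.getD x 0 + 1)) PySem.Dict.empty
  ((PySem.List.sorted counts.keys (fun x => x) false).foldl
      (fun (st : List Int × Int) v => (st.1 ++ [st.2], st.2 - counts.getD v 0))
      ([], (arr.length : Int))).1

-- ===== PRECONDITION & SPEC =====
def Spec_cut_the_ropes (arr : List Int) (out : List Int) : Prop := out = cut_the_ropes_alt arr
instance (arr : List Int) (out : List Int) : Decidable (Spec_cut_the_ropes arr out) := by unfold Spec_cut_the_ropes; infer_instance

-- ===== CLAIM (what is proved, stated in full; the proofs are below) =====
def Claim_equal_cut_the_ropes : Prop := ∀ (arr : List Int), Dom_cut_the_ropes arr → Spec_cut_the_ropes arr (cut_the_ropes arr)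

-- ===== LEMMAS AND PROOFS =====

-- the list A rebuilds each round
def cutStep (a : List Int) : List Int :=
  match PySem.List.min? a (fun x => x) with
  | some m => a.filterMap (fun x => if x - m > 0 then some (x - m) else none)
  | none => a

theorem filterMap_sub (l : List Int) (m : Int) :
    l.filterMap (fun x => if x - m > 0 then some (x - m) else none)
      = (l.filter (fun x => decide (m < x))).map (fun x => x - m) := by
  induction l with
  | nil => rfl
  | cons x t ih =>
    rw [List.filterMap_cons, List.filter_cons]
    by_cases hx : m < x
    · rw [if_pos (show x - m > 0 by omega), if_pos (show (decide (m < x)) = true by simpa using hx),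
        List.map_cons, ih]
    · rw [if_neg (show ¬ x - m > 0 by omega), if_neg (show ¬ (decide (m < x)) = true by simpa using hx), ih]

theorem cutStep_eq (a : List Int) (m : Int)
    (h : PySem.List.min? a (fun x => x) = some m) :
    cutStep a = (a.filter (fun x => decide (m < x))).map (fun x => x - m) := by
  simp only [cutStep, h]
  exact filterMap_sub a m

theorem cutStep_length_lt (a : List Int) (h : a ≠ []) :
    (cutStep a).length < a.length := by
  obtain ⟨m, hm⟩ : ∃ m, PySem.List.min? a (fun x => x) = some m := by
    cases hmm : PySem.List.min? a (fun x => x) with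
    | none => exact absurd ((PySem.List.min?_eq_none_iff _ _).mp hmm) h
    | some m => exact ⟨m, rfl⟩
  rw [cutStep_eq a m hm, List.length_map]
  have hmem : m ∈ a := PySem.List.min?_mem hm
  exact List.length_filter_lt_length_iff_exists.mpr ⟨m, hmem, by simp⟩

-- A's result, recursion on the shrinking list
def cutRef (a : List Int) : List Int :=
  if h : a = [] then []
  else (a.length : Int) :: cutRef (cutStep a)
termination_by a.length
decreasing_by exact cutStep_length_lt a h

-- the emitted sequence: per value of K, emit r then subtract cnt v
def hseq (cnt : Int → Int) : List Int → Int → List Int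
  | [], _ => []
  | v :: K, r => r :: hseq cnt K (r - cnt v)

-- sorted distinct values
def sdist (a : List Int) : List Int :=
  PySem.List.sorted (PySem.Set.ofList a) (fun x => x) false

theorem hseq_congr (cnt cnt' : Int → Int) (K : List Int) (r : Int)
    (h : ∀ v ∈ K, cnt v = cnt' v) : hseq cnt K r = hseq cnt' K r := by
  induction K generalizing r with
  | nil => rfl
  | cons v K ih =>
    simp only [hseq, h v (List.mem_cons_self ..)]
    exact congrArg _ (ih _ (fun w hw => h w (List.mem_cons_of_mem _ hw)))

theorem hseq_map (cnt : Int → Int) (f : Int → Int) (K : List Int) (r : Int) :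
    hseq cnt (K.map f) r = hseq (fun v => cnt (f v)) K r := by
  induction K generalizing r with
  | nil => rfl
  | cons v K ih => simp only [List.map_cons, hseq]; exact congrArg _ (ih _)

theorem sdist_cons (a : List Int) (m : Int)
    (h : PySem.List.min? a (fun x => x) = some m) :
    ∃ T, sdist a = m :: T ∧ T.Pairwise (· < ·) ∧ (∀ v, v ∈ T ↔ v ∈ a ∧ m < v) := by
  have hmem : m ∈ a := PySem.List.min?_mem h
  have hmin : ∀ y ∈ a, m ≤ y := by
    intro y hy
    exact PySem.List.min?_isMin h y hy
  have hpw : (sdist a).Pairwise (· < ·) := PySem.List.sorted_ofList_pairwise_lt a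
  have hne : sdist a ≠ [] := by
    intro hnil
    have : m ∈ sdist a := by
      unfold sdist
      rw [PySem.List.mem_sorted]
      exact (PySem.Set.mem_ofList _ _).mpr hmem
    rw [hnil] at this
    exact absurd this (List.not_mem_nil)
  obtain ⟨h0, T, hT⟩ := List.exists_cons_of_ne_nil hne
  have hmemS : ∀ v, v ∈ sdist a ↔ v ∈ a := by
    intro v
    unfold sdist
    rw [PySem.List.mem_sorted]
    exact PySem.Set.mem_ofList _ _
  rw [hT] at hpw
  have h0m : h0 = m := by
    have h1 : m ≤ h0 := hmin h0 ((hmemS h0).mp (hT ▸ List.mem_cons_self ..))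
    have hmS : m ∈ sdist a := (hmemS m).mpr hmem
    rw [hT] at hmS
    rcases List.mem_cons.mp hmS with h' | h'
    · omega
    · have := (List.pairwise_cons.mp hpw).1 m h'
      omega
  subst h0m
  refine ⟨T, hT, hpw.of_cons, ?_⟩
  intro v
  constructor
  · intro hv
    refine ⟨(hmemS v).mp (hT ▸ List.mem_cons_of_mem _ hv), ?_⟩
    exact (List.pairwise_cons.mp hpw).1 v hv
  · intro ⟨hva, hvm⟩
    have : v ∈ sdist a := (hmemS v).mpr hva
    rw [hT] at this
    cases this with
    | head => omega
    | tail _ h => exact h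

theorem sdist_step (a : List Int) (m : Int) (T : List Int)
    (h : PySem.List.min? a (fun x => x) = some m)
    (hT : sdist a = m :: T) (hTp : T.Pairwise (· < ·))
    (hTm : ∀ v, v ∈ T ↔ v ∈ a ∧ m < v) :
    sdist (cutStep a) = T.map (fun v => v - m) := by
  have hTnd : T.Nodup := List.Pairwise.imp (fun h => ne_of_lt h) hTp
  have hstep := cutStep_eq a m h
  unfold sdist
  apply PySem.List.sorted_eq_of_perm_of_pairwise_lt
  · rw [List.perm_ext_iff_of_nodup (by exact (List.Nodup.map (fun x y hxy => by omega) hTnd))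
        (PySem.Set.nodup_ofList _)]
    intro x
    rw [PySem.Set.mem_ofList _ _, hstep]
    simp only [List.mem_map, List.mem_filter, decide_eq_true_eq]
    constructor
    · rintro ⟨v, hv, rfl⟩
      obtain ⟨hva, hvm⟩ := (hTm v).mp hv
      exact ⟨v, ⟨hva, hvm⟩, rfl⟩
    · rintro ⟨v, ⟨hva, hvm⟩, rfl⟩
      exact ⟨v, (hTm v).mpr ⟨hva, hvm⟩, rfl⟩
  · exact List.Pairwise.map _ (fun {x y} hxy => by omega) hTp

theorem cutRef_eq_hseq (a : List Int) :
    cutRef a = hseq (fun v => (a.count v : Int)) (sdist a) (a.length : Int) := by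
  by_cases ha : a = []
  · subst ha
    rw [cutRef, dif_pos rfl]
    have hnil : sdist ([] : List Int) = [] := by decide
    rw [hnil]
    rfl
  · obtain ⟨m, hm⟩ : ∃ m, PySem.List.min? a (fun x => x) = some m := by
      cases hmm : PySem.List.min? a (fun x => x) with
      | none => exact absurd ((PySem.List.min?_eq_none_iff _ _).mp hmm) ha
      | some m => exact ⟨m, rfl⟩
    obtain ⟨T, hT, hTp, hTm⟩ := sdist_cons a m hm
    rw [cutRef]
    rw [dif_neg ha, hT]
    simp only [hseq]
    congr 1
    rw [cutRef_eq_hseq (cutStep a), sdist_step a m T hm hT hTp hTm, hseq_map]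
    have hmin : ∀ y ∈ a, m ≤ y := fun y hy => PySem.List.min?_isMin hm y hy
    have hlen : ((cutStep a).length : Int) = (a.length : Int) - (a.count m : Int) := by
      rw [cutStep_eq a m hm, List.length_map]
      have h1 := List.length_eq_countP_add_countP (p := fun x => decide (m < x)) (l := a)
      have h2 : List.countP (fun x => decide ¬(decide (m < x) = true)) a = a.count m := by
        rw [List.count]
        apply List.countP_congr
        intro x hx
        have hmx := hmin x hx
        by_cases hc : m < x
        · have hne : ¬ x = m := by omega
          simp [hc, hne]
        · have he : x = m := by omega
          simp [he]
      have h3 : (List.filter (fun x => decide (m < x)) a).length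
          = List.countP (fun x => decide (m < x)) a := List.countP_eq_length_filter.symm
      omega
    rw [hlen]
    apply hseq_congr
    intro v hv
    obtain ⟨hva, hvm⟩ := (hTm v).mp hv
    rw [cutStep_eq a m hm]
    have hinj : Function.Injective (fun x : Int => x - m) := fun x y hxy => by
      have := congrArg (fun z => z + m) hxy
      simpa using this
    have hcm := List.count_map_of_injective
      (l := List.filter (fun x => decide (m < x)) a) (f := fun x : Int => x - m) hinj (x := v)
    simp only [] at hcm
    rw [show v - m = (fun x : Int => x - m) v from rfl, hcm]
    rw [List.count_filter (by simpa using hvm)]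
termination_by a.length
decreasing_by exact cutStep_length_lt a ha

theorem cutA_go_spec (fuel : Nat) (a : List Int) (ans : List Int)
    (h : a.length ≤ fuel) : (cutA_go fuel (ans, a)).1 = ans ++ cutRef a := by
  induction fuel generalizing a ans with
  | zero =>
    have : a = [] := List.eq_nil_of_length_eq_zero (Nat.le_zero.mp h)
    subst this
    simp [cutA_go, cutRef]
  | succ k ih =>
    by_cases ha : a = []
    · subst ha
      simpa [cutA_go, cutA_step, cutRef] using ih [] ans (Nat.zero_le _)
    · have hm : ∃ m, PySem.List.min? a (fun x => x) = some m := by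
        cases hmm : PySem.List.min? a (fun x => x) with
        | none => exact absurd ((PySem.List.min?_eq_none_iff _ _).mp hmm) ha
        | some m => exact ⟨m, rfl⟩
      obtain ⟨m, hm⟩ := hm
      have hlen : 0 < a.length := List.length_pos_iff.mpr ha
      have hstep : cutA_step (ans, a) =
          (ans ++ [(a.length : Int)], cutStep a) := by
        simp [cutA_step, cutStep, hm, hlen]
      rw [cutA_go, hstep, ih _ _ (by have := cutStep_length_lt a ha; omega)]
      conv_rhs => rw [cutRef]
      simp [ha]

theorem foldB_spec (counts : PySem.Dict Int Int) (K : List Int) (acc : List Int) (r : Int) :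
    (K.foldl (fun (st : List Int × Int) v => (st.1 ++ [st.2], st.2 - counts.getD v 0))
        (acc, r)).1 = acc ++ hseq (fun v => counts.getD v 0) K r := by
  induction K generalizing acc r with
  | nil => simp [hseq]
  | cons v K ih => simp [hseq, ih]

-- ===== VERDICT (by name: the statement is the Claim_ definition above) =====
theorem cut_the_ropes_spec : Claim_equal_cut_the_ropes := by
  intro arr _
  unfold Spec_cut_the_ropes cut_the_ropes cut_the_ropes_alt
  rw [cutA_go_spec arr.length arr [] (le_refl _), foldB_spec]
  simp only [List.nil_append]
  rw [PySem.Dict.foldl_insert_getD_add_one_eq_counter, PySem.Dict.keys_counter]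
  rw [cutRef_eq_hseq]
  exact hseq_congr _ _ _ _ (by intro v _; simp [PySem.Dict.getD_counter])
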